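-- pv_equiv track=rewrite | github.com/rigetti/representability | representability/fermions/basis_utils.py | _three_parity
-- ===== SOURCE A (Python) =====
-- def _three_parity(p, q, r):
--     parity_terms = [(p, q, r, 1),  # no switch
--                     (p, r, q, -1),  # r <-> q
--                     (q, p, r, -1),  # p <-> q
--                     (q, r, p, 1),  # p <-> q, r <-> p
--                     (r, p, q, 1),  # r <-> q, r <-> p
--                     (r, q, p, -1)  # r <-> q, r <-> p, p <-> q
--                     ]
--     for term in parity_terms:
--         yield term
-- ===== SOURCE B (Python) =====
-- from itertools import permutations
--
-- def _three_parity(p, q, r):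
--     vals = (p, q, r)
--     for idx in permutations(range(3)):
--         inv = sum(1 for i in range(3) for j in range(i + 1, 3) if idx[i] > idx[j])
--         yield (vals[idx[0]], vals[idx[1]], vals[idx[2]], 1 if inv % 2 == 0 else -1)
-- ===== Notes on version B (the rewrite author's own statement) =====
-- stated objective: idiomatic
-- what changed: Replaces the hand-written six-row table with itertools.permutations over the indices 0..2, computing each sign from the inversion parity of the index permutation.
import Mathlib
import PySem

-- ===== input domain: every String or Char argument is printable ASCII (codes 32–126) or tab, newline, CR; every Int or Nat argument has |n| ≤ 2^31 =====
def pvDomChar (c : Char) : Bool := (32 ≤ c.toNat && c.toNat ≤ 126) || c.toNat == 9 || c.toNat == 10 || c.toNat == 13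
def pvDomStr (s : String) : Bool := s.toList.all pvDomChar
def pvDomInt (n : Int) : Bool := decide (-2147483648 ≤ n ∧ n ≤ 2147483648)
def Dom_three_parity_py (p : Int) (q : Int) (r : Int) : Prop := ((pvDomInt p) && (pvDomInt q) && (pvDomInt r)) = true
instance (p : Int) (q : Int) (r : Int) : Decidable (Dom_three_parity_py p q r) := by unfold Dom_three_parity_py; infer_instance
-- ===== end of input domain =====

-- B replaces A's hand-written six-row table with index permutations plus inversion-parity signs (idiomatic rewrite, same cost).


-- ===== PORT A =====
-- Literal port of A: the explicit six-row table, yielded in order.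
def three_parity_py (p : Int) (q : Int) (r : Int) : List (Int × Int × Int × Int) :=
  let parity_terms : List (Int × Int × Int × Int) :=
    [(p, q, r, 1),
     (p, r, q, -1),
     (q, p, r, -1),
     (q, r, p, 1),
     (r, p, q, 1),
     (r, q, p, -1)]
  parity_terms.foldl (fun acc term => acc ++ [term]) []

-- ===== PORT B =====
-- itertools.permutations in lexicographic order: pick each element in turn, permute the rest.
def pvPermsLexAux : Nat → List Nat → List (List Nat)
  | 0, _ => [[]]
  | n + 1, xs =>
    (List.range xs.length).flatMap (fun i =>
      (pvPermsLexAux n (xs.take i ++ xs.drop (i + 1))).map (fun rest => xs.getD i 0 :: rest))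

def pvPermsLex (xs : List Nat) : List (List Nat) := pvPermsLexAux xs.length xs

-- inversion count of an index permutation: pairs i < j with idx[i] > idx[j]
def pvInvCount (idx : List Nat) : Nat :=
  ((List.range 3).flatMap (fun i =>
    (List.range' (i + 1) (3 - (i + 1))).filter (fun j => idx.getD j 0 < idx.getD i 0))).length

def three_parity_py_alt (p : Int) (q : Int) (r : Int) : List (Int × Int × Int × Int) :=
  let vals : List Int := [p, q, r]
  (pvPermsLex [0, 1, 2]).map (fun idx =>
    (vals.getD (idx.getD 0 0) 0, vals.getD (idx.getD 1 0) 0, vals.getD (idx.getD 2 0) 0,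
     if pvInvCount idx % 2 == 0 then (1 : Int) else -1))

-- ===== PRECONDITION & SPEC =====
def Spec_three_parity_py (p : Int) (q : Int) (r : Int) (out : List (Int × Int × Int × Int)) : Prop := out = three_parity_py_alt p q r
instance (p : Int) (q : Int) (r : Int) (out : List (Int × Int × Int × Int)) : Decidable (Spec_three_parity_py p q r out) := by unfold Spec_three_parity_py; infer_instance

-- ===== CLAIM (what is proved, stated in full; the proofs are below) =====
def Claim_equal_three_parity_py : Prop := ∀ (p : Int) (q : Int) (r : Int), Dom_three_parity_py p q r → Spec_three_parity_py p q r (three_parity_py p q r)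

-- ===== LEMMAS AND PROOFS =====
theorem pvPermsLex_012 : pvPermsLex [0, 1, 2] =
    [[0,1,2],[0,2,1],[1,0,2],[1,2,0],[2,0,1],[2,1,0]] := by decide

-- ===== VERDICT (by name: the statement is the Claim_ definition above) =====
theorem three_parity_py_spec : Claim_equal_three_parity_py := by
  intro p q r _
  unfold Spec_three_parity_py three_parity_py three_parity_py_alt
  rw [pvPermsLex_012]
  rfl
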